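-- pv_equiv track=rewrite | github.com/g0yujin/CodingTest_Practice | 프로그래머스/0/181887. 홀수 vs 짝수/홀수 vs 짝수.py | solution
-- ===== SOURCE A (Python) =====
-- def solution(num_list):
--     hol = 0
--     jjak = 0
--
--     for i in range(1, len(num_list)+1):
--         if i % 2 == 0:
--             jjak += num_list[i-1]
--         else:
--             hol += num_list[i-1]
--
--     return max(hol, jjak)
-- ===== SOURCE B (Python) =====
-- def solution(num_list):
--     hol = sum(num_list[::2])
--     jjak = sum(num_list[1::2])
--     return max(hol, jjak)
-- ===== Notes on version B (the rewrite author's own statement) =====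
-- stated objective: idiomatic
-- what changed: Replaces the 1-indexed counting loop with its parity branch by two strided slice sums (num_list[::2] and num_list[1::2]) and a final max; no conditional and no index arithmetic, and the summing runs in C.
import Mathlib
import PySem

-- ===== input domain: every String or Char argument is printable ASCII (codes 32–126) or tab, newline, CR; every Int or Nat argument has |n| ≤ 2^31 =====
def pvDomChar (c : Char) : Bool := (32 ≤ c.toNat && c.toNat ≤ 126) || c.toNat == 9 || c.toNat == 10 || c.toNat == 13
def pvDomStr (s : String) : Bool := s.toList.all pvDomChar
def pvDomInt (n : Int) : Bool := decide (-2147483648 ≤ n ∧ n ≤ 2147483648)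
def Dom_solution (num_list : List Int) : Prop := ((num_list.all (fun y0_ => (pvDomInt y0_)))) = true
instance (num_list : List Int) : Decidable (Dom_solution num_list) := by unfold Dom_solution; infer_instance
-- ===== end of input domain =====

-- B replaces A's 1-indexed parity-branching loop with two strided slice sums (xs[::2], xs[1::2]) and max; same O(n) cost, more idiomatic.


-- ===== PORT A =====
-- for i in range(1, len(num_list)+1): if i % 2 == 0: jjak += num_list[i-1] else: hol += num_list[i-1]; return max(hol, jjak)
-- (i-1 is always in range, so pyGetD with default 0 is exact here)
def solution (num_list : List Int) : Int :=
  let st := (PySem.List.pyRange 1 ((num_list.length : Int) + 1) 1).foldl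
    (fun (st : Int × Int) i =>
      if PySem.Int.mod i 2 == 0 then (st.1, st.2 + PySem.List.pyGetD num_list (i - 1) 0)
      else (st.1 + PySem.List.pyGetD num_list (i - 1) 0, st.2))
    (0, 0)
  max st.1 st.2

-- ===== PORT B =====
-- hol = sum(num_list[::2]); jjak = sum(num_list[1::2]); return max(hol, jjak)
-- (step-2 slices always succeed, so .getD [] is exact)
def solution_alt (num_list : List Int) : Int :=
  let hol := ((PySem.List.slice? num_list none none 2).getD []).sum
  let jjak := ((PySem.List.slice? num_list (some 1) none 2).getD []).sum
  max hol jjak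

-- ===== PRECONDITION & SPEC =====
def Spec_solution (num_list : List Int) (out : Int) : Prop := out = solution_alt num_list
instance (num_list : List Int) (out : Int) : Decidable (Spec_solution num_list out) := by unfold Spec_solution; infer_instance

-- ===== CLAIM (what is proved, stated in full; the proofs are below) =====
def Claim_equal_solution : Prop := ∀ (num_list : List Int), Dom_solution num_list → Spec_solution num_list (solution num_list)

-- ===== LEMMAS AND PROOFS =====

-- elements at even / odd 0-based positions
mutual
def evensL {α : Type} : List α → List α
  | [] => []
  | x :: t => x :: oddsL t
def oddsL {α : Type} : List α → List α
  | [] => []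
  | _ :: t => evensL t
end

theorem coreN {α : Type} : ∀ (xs : List α),
    (List.range ((xs.length + 1) / 2)).filterMap (fun k => xs[2 * k]?) = evensL xs
  | [] => by simp [evensL]
  | [x] => by simp [evensL, oddsL]
  | x :: y :: t => by
    have ih := coreN t
    have hcnt : ((x :: y :: t).length + 1) / 2 = (t.length + 1) / 2 + 1 := by
      simp only [List.length_cons]; omega
    rw [hcnt, List.range_succ_eq_map]
    simp only [List.filterMap_cons, List.filterMap_map]
    have h0 : (x :: y :: t)[2 * 0]? = some x := rfl
    rw [h0]
    have hfun : ∀ k : ℕ, (x :: y :: t)[2 * Nat.succ k]? = t[2 * k]? := by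
      intro k
      have : 2 * Nat.succ k = 2 * k + 2 := by omega
      rw [this]
      simp [List.getElem?_cons_succ]
    simp only [Function.comp]
    rw [List.filterMap_congr (by intro k _; rw [hfun k])]
    rw [ih]
    rfl

theorem slice2_eq {α : Type} (xs : List α) :
    PySem.List.slice? xs none none 2 = some (evensL xs) := by
  rw [PySem.List.slice?, PySem.List.sliceIndices]
  norm_num
  have hcnt : (if 0 < xs.length then (((xs.length : Int) + 2 - 1) / 2).toNat else 0)
      = (xs.length + 1) / 2 := by split <;> omega
  rw [hcnt]
  rw [List.filterMap_congr (g := fun k => xs[2 * k]?) ?_]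
  · exact coreN xs
  · intro k _
    have : ((2 : Int) * (k : Int)).toNat = 2 * k := by omega
    rw [this]

theorem slice2_from1_eq {α : Type} (xs : List α) :
    PySem.List.slice? xs (some 1) none 2 = some (oddsL xs) := by
  rw [PySem.List.slice?, PySem.List.sliceIndices]
  norm_num
  cases xs with
  | nil => simp [oddsL]
  | cons x t =>
    have hmin : min (1 : Int) (((x :: t).length : Int)) = 1 := by
      simp only [List.length_cons]; omega
    rw [hmin]
    have hcnt : (if 1 < (x :: t).length then ((((x :: t).length : Int) - 1 + 2 - 1) / 2).toNat else 0)
        = (t.length + 1) / 2 := by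
      simp only [List.length_cons]; split <;> omega
    rw [hcnt]
    rw [List.filterMap_congr (g := fun k => t[2 * k]?) ?_]
    · rw [coreN]; rfl
    · intro k _
      have h1 : ((1 : Int) + 2 * (k : Int)).toNat = 2 * k + 1 := by omega
      rw [h1]
      simp [List.getElem?_cons_succ]

-- the loop of A, generalized: folding from position a with accumulator (h, j)
theorem foldA (L : List Int) (t : List Int) (a : ℕ) (h j : Int)
    (hd : L.drop a = t) :
    (PySem.List.pyRange ((a : Int) + 1) ((L.length : Int) + 1) 1).foldl
      (fun (st : Int × Int) i =>
        if PySem.Int.mod i 2 == 0 then (st.1, st.2 + PySem.List.pyGetD L (i - 1) 0)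
        else (st.1 + PySem.List.pyGetD L (i - 1) 0, st.2)) (h, j)
    = if a % 2 = 0 then (h + (evensL t).sum, j + (oddsL t).sum)
      else (h + (oddsL t).sum, j + (evensL t).sum) := by
  induction t generalizing a h j with
  | nil =>
    have hge : L.length ≤ a := by
      by_contra hlt
      push_neg at hlt
      have := List.drop_eq_nil_iff.mp hd
      omega
    rw [PySem.List.pyRange_one_eq_nil (by omega)]
    simp [evensL, oddsL]
  | cons x t' ih =>
    have halt : a < L.length := by
      by_contra hge
      push_neg at hge
      rw [List.drop_eq_nil_iff.mpr hge] at hd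
      simp at hd
    have hx : L[a]? = some x := by
      have h0 : (L.drop a)[0]? = some x := by rw [hd]; rfl
      rw [List.getElem?_drop] at h0
      simpa using h0
    have hd' : L.drop (a + 1) = t' := by
      rw [← List.tail_drop, hd]
      rfl
    rw [PySem.List.pyRange_one_cons (by omega)]
    rw [List.foldl_cons]
    have hget : PySem.List.pyGetD L ((a : Int) + 1 - 1) 0 = x := by
      have : (a : Int) + 1 - 1 = (a : Int) := by ring
      rw [this]
      simp [PySem.List.pyGetD, PySem.List.pyGet?_natCast, hx]
    by_cases hpar : a % 2 = 0
    · have hm : (PySem.Int.mod ((a : Int) + 1) 2 == 0) = false := by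
        simp [PySem.Int.mod, Int.fmod_eq_emod]
        omega
      rw [hm]
      simp only [Bool.false_eq_true, if_false, hget]
      have ih' := ih (a + 1) (h + x) j hd'
      push_cast at ih' ⊢
      rw [ih']
      have hp2 : ¬ (a + 1) % 2 = 0 := by omega
      rw [if_neg hp2, if_pos hpar]
      simp [evensL, oddsL]
      ring
    · have hm : (PySem.Int.mod ((a : Int) + 1) 2 == 0) = true := by
        simp [PySem.Int.mod, Int.fmod_eq_emod]
        omega
      rw [hm]
      simp only [if_true, hget]
      have ih' := ih (a + 1) h (j + x) hd'
      push_cast at ih' ⊢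
      rw [ih']
      have hp2 : (a + 1) % 2 = 0 := by omega
      rw [if_pos hp2, if_neg hpar]
      simp [evensL, oddsL]
      ring

-- ===== VERDICT (by name: the statement is the Claim_ definition above) =====
theorem solution_spec : Claim_equal_solution := by
  intro L _
  unfold Spec_solution solution solution_alt
  rw [slice2_eq, slice2_from1_eq]
  have h := foldA L L 0 0 0 (by simp)
  simp at h ⊢
  rw [h]
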